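-- pv_equiv track=rewrite | github.com/DKU-STUDY/Algorithm | programmers/난이도별/level02.멀쩡한_사각형/12eon.py | solution
-- ===== SOURCE A (Python) =====
-- def solution(w,h):
-- # w와 h의 최대공약수만큼 사각형을 지날때마다 꼭짓점을 중간에 만나게 되는 규칙
--     if w > h: # w <= h 상태를 이용
--         tmp = h
--         h = w
--         w = tmp
--
--     for d in range(w,1,-1):
--         if w%d == 0 and h%d == 0: # 최대공약수
--             # 최대공약수가 1이 아닌 경우
--             # 꼭짓점을 만날 때마다 반복되었던 위치가 1칸씩 뒤로 밀려서 만나는 사각형이 감소(d)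
--             # w + h - d
--             return w*h - (w+h-d)
--     # 최대공약수가 1인 경우 : 대각선이 사각형의 꼭짓점을 양끝을 제외하고는 지나지 않음
--     # 가로 방향에 보면 h개를 지남 + 세로 방향으로 보면 w개를 지남 - 가로와 세로로 갈 때 시작하는 사각형이 같음(1)
--     # w + h -1
--     return w*h - (w+h-1)
-- ===== SOURCE B (Python) =====
-- def solution(w, h):
--     # Euclidean algorithm (modulo-reduction loop) instead of a downward divisor scan,
--     # then the closed-form count. The gcd reduction only applies to a real (positive)
--     # rectangle; otherwise the diagonal meets no interior lattice point (factor 1).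
--     g = 1
--     if w >= 1 and h >= 1:
--         a, b = w, h
--         while b:
--             a, b = b, a % b
--         g = a
--     return w * h - (w + h - g)
-- ===== Notes on version B (the rewrite author's own statement) =====
-- stated objective: faster
-- what changed: Replaces A's swap-then-downward-scan over every candidate divisor with the Euclidean algorithm (a modulo-reduction loop on the pair) on positive dimensions, then applies the same closed-form count.
import Mathlib
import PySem

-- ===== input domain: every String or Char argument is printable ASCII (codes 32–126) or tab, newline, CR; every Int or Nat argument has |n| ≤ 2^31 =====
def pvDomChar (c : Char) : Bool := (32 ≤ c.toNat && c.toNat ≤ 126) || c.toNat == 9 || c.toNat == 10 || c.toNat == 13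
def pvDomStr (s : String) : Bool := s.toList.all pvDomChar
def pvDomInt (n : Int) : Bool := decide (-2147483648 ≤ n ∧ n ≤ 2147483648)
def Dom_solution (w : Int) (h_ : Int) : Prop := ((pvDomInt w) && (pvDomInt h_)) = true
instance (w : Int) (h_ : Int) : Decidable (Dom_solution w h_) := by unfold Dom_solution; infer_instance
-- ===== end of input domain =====

-- B replaces A's downward divisor scan with a Euclidean modulo-reduction loop on positive
-- dimensions (fall-through factor 1 otherwise, as the formula degenerates there), same closed form.


-- ===== PORT A =====
-- the 'for d in range(w,1,-1): if …: return …' loop with its fall-through return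
def loopA (w h : Int) : List Int → Int
  | [] => w * h - (w + h - 1)
  | d :: rest =>
      if PySem.Int.mod w d = 0 ∧ PySem.Int.mod h d = 0 then w * h - (w + h - d)
      else loopA w h rest

def solution (w : Int) (h_ : Int) : Int :=
  let p := if w > h_ then (h_, w) else (w, h_)   -- the tmp-swap so that p.1 ≤ p.2
  loopA p.1 p.2 (PySem.List.pyRange p.1 1 (-1))

-- ===== PORT B =====
-- termination of the 'while b: a, b = b, a % b' loop: Python's remainder shrinks in absolute value
theorem pyMod_natAbs_lt (a b : Int) (hb : b ≠ 0) :
    (PySem.Int.mod a b).natAbs < b.natAbs := by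
  rcases lt_or_gt_of_ne hb with h | h
  · have := PySem.Int.mod_neg_bounds a h
    omega
  · have h1 := PySem.Int.mod_nonneg a h
    have h2 := PySem.Int.mod_lt a h
    omega

def euclid (a b : Int) : Int :=
  if hb : b = 0 then a else euclid b (PySem.Int.mod a b)
termination_by b.natAbs
decreasing_by exact pyMod_natAbs_lt a b hb

def solution_alt (w : Int) (h_ : Int) : Int :=
  let g := if 1 ≤ w ∧ 1 ≤ h_ then euclid w h_ else 1
  w * h_ - (w + h_ - g)

-- ===== PRECONDITION & SPEC =====
def Spec_solution (w : Int) (h_ : Int) (out : Int) : Prop := out = solution_alt w h_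
instance (w : Int) (h_ : Int) (out : Int) : Decidable (Spec_solution w h_ out) := by unfold Spec_solution; infer_instance

-- ===== CLAIM (what is proved, stated in full; the proofs are below) =====
def Claim_equal_solution : Prop := ∀ (w : Int) (h_ : Int), Dom_solution w h_ → Spec_solution w h_ (solution w h_)

-- ===== LEMMAS AND PROOFS =====

-- B's Euclid loop computes the gcd on nonnegative inputs
theorem euclid_eq_gcd (b a : Int) (ha : 0 ≤ a) (hb : 0 ≤ b) :
    euclid a b = (Int.gcd a b : Int) := by
  by_cases h0 : b = 0
  · subst h0
    rw [euclid]
    simp [Int.natAbs_of_nonneg ha, Int.gcd]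
  · have hbpos : 0 < b := lt_of_le_of_ne hb (Ne.symm h0)
    rw [euclid]
    simp only [h0, dite_false]
    have hr : PySem.Int.mod a b = a % b := PySem.Int.mod_eq_emod_of_pos hbpos
    have := pyMod_natAbs_lt a b h0
    rw [euclid_eq_gcd (PySem.Int.mod a b) b hb
      (by rw [hr]; exact Int.emod_nonneg a h0)]
    rw [hr, Int.gcd_comm b (a % b), Int.gcd_emod]
termination_by b.natAbs
decreasing_by omega

-- A's scan from any d ≥ gcd lands exactly on the gcd's formula (w, h positive)
theorem loopA_eq_gcd (w h : Int) (hw : 1 ≤ w) (hh : 1 ≤ h) :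
    ∀ d : Int, (Int.gcd w h : Int) ≤ d →
      loopA w h (PySem.List.pyRange d 1 (-1)) = w * h - (w + h - (Int.gcd w h : Int)) := by
  intro d hgd
  have hg1 : 1 ≤ (Int.gcd w h : Int) := by
    have : w.gcd h ≠ 0 := by
      simp [Int.gcd_eq_zero_iff]
      omega
    omega
  by_cases hd2 : d ≤ 1
  · have hg : (Int.gcd w h : Int) = 1 := le_antisymm (le_trans hgd hd2) hg1
    rw [PySem.List.pyRange_neg_one_eq_nil hd2, hg, loopA]
  · push Not at hd2
    rw [PySem.List.pyRange_neg_one_cons hd2, loopA]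
    by_cases hdvd : PySem.Int.mod w d = 0 ∧ PySem.Int.mod h d = 0
    · have hdw : d ∣ w := (PySem.Int.mod_eq_zero_iff_dvd w d).mp hdvd.1
      have hdh : d ∣ h := (PySem.Int.mod_eq_zero_iff_dvd h d).mp hdvd.2
      have htn : (d.toNat : Int) = d := Int.toNat_of_nonneg (by omega)
      have hnat : d.toNat ∣ Int.gcd w h :=
        Int.dvd_gcd (by rwa [htn]) (by rwa [htn])
      have hddg : d ∣ (Int.gcd w h : Int) := by
        rw [← htn]; exact_mod_cast hnat
      have : d ≤ (Int.gcd w h : Int) := Int.le_of_dvd (by omega) hddg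
      rw [if_pos hdvd]
      omega
    · have hgd' : (Int.gcd w h : Int) ≤ d - 1 := by
        rcases lt_or_eq_of_le hgd with hlt | heq
        · omega
        · exfalso
          apply hdvd
          constructor
          · rw [PySem.Int.mod_eq_zero_iff_dvd, ← heq]
            exact Int.gcd_dvd_left w h
          · rw [PySem.Int.mod_eq_zero_iff_dvd, ← heq]
            exact Int.gcd_dvd_right w h
      rw [if_neg hdvd]
      exact loopA_eq_gcd w h hw hh (d - 1) hgd'
termination_by d => d.toNat
decreasing_by omega

theorem gcd_le_left (w h : Int) (hw : 1 ≤ w) : (Int.gcd w h : Int) ≤ w :=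
  Int.le_of_dvd (by omega) (Int.gcd_dvd_left w h)

-- ===== VERDICT (by name: the statement is the Claim_ definition above) =====
theorem solution_spec : Claim_equal_solution := by
  intro w h_ _
  unfold Spec_solution solution solution_alt
  by_cases hpos : 1 ≤ w ∧ 1 ≤ h_
  · obtain ⟨hw, hh⟩ := hpos
    rw [if_pos (show (1:Int) ≤ w ∧ (1:Int) ≤ h_ from ⟨hw, hh⟩),
      euclid_eq_gcd h_ w (by omega) (by omega)]
    by_cases hlt : w > h_
    · rw [if_pos hlt]
      dsimp only
      rw [loopA_eq_gcd h_ w hh hw h_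
        (le_trans (by rw [Int.gcd_comm]) (gcd_le_left h_ w hh))]
      rw [Int.gcd_comm w h_]
      ring
    · rw [if_neg hlt]
      dsimp only
      rw [loopA_eq_gcd w h_ hw hh w (gcd_le_left w h_ hw)]
  · rw [if_neg hpos]
    have hside : w ≤ 1 ∨ h_ ≤ 1 := by
      rcases not_and_or.mp hpos with h | h
      · left; omega
      · right; omega
    by_cases hlt : w > h_
    · rw [if_pos hlt]
      dsimp only
      rw [PySem.List.pyRange_neg_one_eq_nil (show h_ ≤ 1 by omega), loopA]
      ring
    · rw [if_neg hlt]
      dsimp only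
      rw [PySem.List.pyRange_neg_one_eq_nil (show w ≤ 1 by omega), loopA]
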